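-- pv_equiv track=rewrite | github.com/lesliewu0506/Helix-Hunters | src/algorithms/folding_functions.py | two_strings_fold
-- ===== SOURCE A (Python) =====
-- def two_strings_fold(protein_sequence: str) -> list[int]:
--     sequence_list: list[int] = []
--     protein_length = len(protein_sequence)
--     for i in range(protein_length):
--         if i < (protein_length // 2 - 1):
--             sequence_list.append(1)
--         elif i == (protein_length // 2 - 1):
--             sequence_list.append(2)
--         elif i == (protein_length - 1):
--             sequence_list.append(0)
--         else:
--             sequence_list.append(-1)
--     return sequence_list
-- ===== SOURCE B (Python) =====
-- def two_strings_fold(protein_sequence: str) -> list[int]: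
--     n = len(protein_sequence)
--     if n == 0:
--         return []
--     if n == 1:
--         return [0]
--     h = n // 2 - 1
--     return [1] * h + [2] + [-1] * (n - h - 2) + [0]
-- ===== Notes on version B (the rewrite author's own statement) =====
-- stated objective: simpler
-- what changed: Replaces A's per-index 4-way branch loop by a closed-form concatenation of four segments with computed lengths ([1]*h + [2] + [-1]*middle + [0]), with small-n cases handled explicitly; no loop or indexing at all.
import Mathlib
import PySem

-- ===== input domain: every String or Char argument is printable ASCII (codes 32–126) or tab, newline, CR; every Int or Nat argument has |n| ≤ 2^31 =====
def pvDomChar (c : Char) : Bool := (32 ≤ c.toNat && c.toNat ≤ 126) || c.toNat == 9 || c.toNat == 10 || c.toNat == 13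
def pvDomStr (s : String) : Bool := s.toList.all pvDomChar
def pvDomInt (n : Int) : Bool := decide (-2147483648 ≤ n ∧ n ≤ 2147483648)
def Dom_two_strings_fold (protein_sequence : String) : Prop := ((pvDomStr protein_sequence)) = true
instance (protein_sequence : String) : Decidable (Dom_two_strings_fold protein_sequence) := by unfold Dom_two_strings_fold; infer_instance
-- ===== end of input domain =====

-- B replaces A's per-index 4-way branch loop by a loop-free closed-form concatenation of four segments with computed lengths (objective: simpler).

-- ===== PORT A =====
def two_strings_fold (protein_sequence : String) : List Int :=
  let protein_length : Int := PySem.Str.len protein_sequence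
  (PySem.List.pyRange 0 protein_length 1).foldl (fun sequence_list i =>
    if i < PySem.Int.floordiv protein_length 2 - 1 then sequence_list ++ [(1 : Int)]
    else if i = PySem.Int.floordiv protein_length 2 - 1 then sequence_list ++ [2]
    else if i = protein_length - 1 then sequence_list ++ [0]
    else sequence_list ++ [-1]) []

-- ===== PORT B =====
def two_strings_fold_alt (protein_sequence : String) : List Int :=
  let n : Int := PySem.Str.len protein_sequence
  if n = 0 then []
  else if n = 1 then [0]
  else
    let h : Int := PySem.Int.floordiv n 2 - 1
    List.replicate h.toNat 1 ++ [2] ++ List.replicate (n - h - 2).toNat (-1) ++ [0]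

-- ===== PRECONDITION & SPEC =====
def Spec_two_strings_fold (protein_sequence : String) (out : List Int) : Prop := out = two_strings_fold_alt protein_sequence
instance (protein_sequence : String) (out : List Int) : Decidable (Spec_two_strings_fold protein_sequence out) := by unfold Spec_two_strings_fold; infer_instance

-- ===== CLAIM =====
def Claim_equal_two_strings_fold : Prop := ∀ (protein_sequence : String), Dom_two_strings_fold protein_sequence → Spec_two_strings_fold protein_sequence (two_strings_fold protein_sequence)

-- ===== LEMMAS AND PROOFS =====

-- A's loop, generalized: appending one element per index is a map
theorem foldA (c d : Int) (L : List Int) (r : List Int) :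
    L.foldl (fun (acc : List Int) (i : Int) => if i < c then acc ++ [(1 : Int)]
      else if i = c then acc ++ [2]
      else if i = d then acc ++ [0]
      else acc ++ [-1]) r
    = r ++ L.map (fun (i : Int) => if i < c then (1 : Int) else if i = c then 2 else if i = d then 0 else -1) := by
  induction L generalizing r with
  | nil => simp
  | cons a t ih =>
    simp only [List.foldl_cons, List.map_cons, ih]
    split_ifs <;> simp

theorem twoStrings_A_map (s : String) :
    two_strings_fold s =
      (List.range s.toList.length).map (fun (k : Nat) =>
        if (k : Int) < PySem.Int.floordiv (s.toList.length : Int) 2 - 1 then (1 : Int)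
        else if (k : Int) = PySem.Int.floordiv (s.toList.length : Int) 2 - 1 then 2
        else if (k : Int) = (s.toList.length : Int) - 1 then 0
        else -1) := by
  unfold two_strings_fold
  rw [foldA]
  simp [PySem.Str.len_eq, PySem.List.pyRange_zero_natCast, List.map_map, Function.comp_def]

theorem keyB (m : Nat) :
    ((List.range m).map (fun (k : Nat) =>
        if (k : Int) < PySem.Int.floordiv (m : Int) 2 - 1 then (1 : Int)
        else if (k : Int) = PySem.Int.floordiv (m : Int) 2 - 1 then 2
        else if (k : Int) = (m : Int) - 1 then 0
        else -1)) =
    (if (m : Int) = 0 then []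
     else if (m : Int) = 1 then [0]
     else
       let h : Int := PySem.Int.floordiv (m : Int) 2 - 1
       List.replicate h.toNat 1 ++ [2] ++ List.replicate ((m : Int) - h - 2).toNat (-1) ++ [0]) := by
  have hfd : PySem.Int.floordiv (m : Int) 2 = ((m / 2 : Nat) : Int) := by
    exact_mod_cast PySem.Int.floordiv_natCast m 2
  simp only [hfd]
  by_cases h2 : 2 ≤ m
  · have hm0 : ¬ ((m : Int) = 0) := by omega
    have hm1 : ¬ ((m : Int) = 1) := by omega
    rw [if_neg hm0, if_neg hm1]
    have hh : 1 ≤ m / 2 := by omega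
    apply List.ext_getElem
    · simp
      omega
    · intro k hk1 hk2
      simp only [List.length_map, List.length_range, List.length_append,
        List.length_replicate, List.length_cons, List.length_nil] at hk1 hk2
      simp only [List.getElem_map, List.getElem_range, List.getElem_append,
        List.getElem_replicate, List.length_replicate, List.length_append,
        List.length_cons, List.length_nil, List.getElem_singleton]
      split_ifs <;> first | rfl | omega
  · interval_cases m <;> decide

theorem two_strings_fold_eq (s : String) : two_strings_fold s = two_strings_fold_alt s := by
  rw [twoStrings_A_map]
  unfold two_strings_fold_alt
  rw [PySem.Str.len_eq]
  exact keyB s.toList.length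

-- ===== VERDICT =====
theorem two_strings_fold_spec : Claim_equal_two_strings_fold := by
  intro s _
  unfold Spec_two_strings_fold
  exact two_strings_fold_eq s
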